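-- pv_equiv track=rewrite | github.com/wq2581/DrugClaw | drugclaw/query_plan.py | _aggregate_risk_level
-- ===== SOURCE A (Python) =====
-- from typing import Any, Dict, List, Sequence
--
-- def _normalize_token(value: str) -> str:
--     return str(value or "").strip().lower().replace("-", "_").replace(" ", "_")
--
-- def _aggregate_risk_level(levels: Sequence[str]) -> str:
--     normalized = {_normalize_token(level) for level in levels if str(level).strip()}
--     if "high" in normalized:
--         return "high"
--     if "medium" in normalized:
--         return "medium"
--     if "low" in normalized:
--         return "low"
--     return "medium"
-- ===== SOURCE B (Python) =====
-- def _normalize_token(value: str) -> str: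
--     return str(value or "").strip().lower().replace("-", "_").replace(" ", "_")
--
-- _RANK = {"high": 3, "medium": 2, "low": 1}
-- _LABEL = {3: "high", 1: "low"}
--
-- def _aggregate_risk_level(levels):
--     best = 0
--     for level in levels:
--         if str(level).strip():
--             r = _RANK.get(_normalize_token(level), 0)
--             if r > best:
--                 best = r
--             if best == 3:
--                 break
--     return _LABEL.get(best, "medium")
-- ===== Notes on version B (the rewrite author's own statement) =====
-- stated objective: alternative
-- what changed: Replaces the set-comprehension plus three membership tests with a single pass keeping a running maximum severity rank (with early exit on 'high') and a final rank-to-label lookup; no set is built.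
import Mathlib
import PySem

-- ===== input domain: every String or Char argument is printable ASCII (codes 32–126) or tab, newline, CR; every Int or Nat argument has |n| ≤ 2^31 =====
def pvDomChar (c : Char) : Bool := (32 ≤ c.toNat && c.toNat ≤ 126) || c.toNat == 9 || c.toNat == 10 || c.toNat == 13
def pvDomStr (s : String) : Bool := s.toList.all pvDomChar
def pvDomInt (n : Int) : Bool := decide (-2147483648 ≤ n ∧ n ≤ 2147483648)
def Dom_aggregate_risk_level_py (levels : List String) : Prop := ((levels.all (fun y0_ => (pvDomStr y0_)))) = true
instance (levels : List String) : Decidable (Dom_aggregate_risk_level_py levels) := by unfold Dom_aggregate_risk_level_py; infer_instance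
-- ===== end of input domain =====

-- B replaces A's set comprehension + three membership tests by a single pass keeping a
-- running maximum severity rank (early exit on 'high') and a final rank-to-label lookup.

-- ===== PORT A =====
-- _normalize_token (shared helper of Source A and Source B, identical source in both)
def normalize_token_py (value : String) : String :=
  PySem.Str.replace (PySem.Str.replace (PySem.Str.lower (PySem.Str.strip value)) "-" "_") " " "_"

def aggregate_risk_level_py (levels : List String) : String :=
  let normalized : PySem.Set String :=
    levels.foldl (fun s level =>
      if PySem.Str.strip level ≠ "" then PySem.Set.add s (normalize_token_py level) else s)
      PySem.Set.empty
  if PySem.Set.contains normalized "high" then "high"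
  else if PySem.Set.contains normalized "medium" then "medium"
  else if PySem.Set.contains normalized "low" then "low"
  else "medium"

-- ===== PORT B =====
def RANK_py : PySem.Dict String Int := PySem.Dict.ofList [("high", 3), ("medium", 2), ("low", 1)]
def LABEL_py : PySem.Dict Int String := PySem.Dict.ofList [(3, "high"), (1, "low")]

-- the 'for level in levels: … break' loop of Source B
def altLoop_py : List String → Int → Int
  | [], best => best
  | level :: rest, best =>
    if PySem.Str.strip level ≠ "" then
      let r := PySem.Dict.getD RANK_py (normalize_token_py level) 0
      let best' := if r > best then r else best
      if best' == 3 then best' else altLoop_py rest best'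
    else altLoop_py rest best

def aggregate_risk_level_py_alt (levels : List String) : String :=
  PySem.Dict.getD LABEL_py (altLoop_py levels 0) "medium"

-- ===== PRECONDITION & SPEC =====
def Spec_aggregate_risk_level_py (levels : List String) (out : String) : Prop := out = aggregate_risk_level_py_alt levels
instance (levels : List String) (out : String) : Decidable (Spec_aggregate_risk_level_py levels out) := by unfold Spec_aggregate_risk_level_py; infer_instance

-- ===== CLAIM (what is proved, stated in full; the proofs are below) =====
def Claim_equal_aggregate_risk_level_py : Prop := ∀ (levels : List String), Dom_aggregate_risk_level_py levels → Spec_aggregate_risk_level_py levels (aggregate_risk_level_py levels)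

-- ===== LEMMAS AND PROOFS =====

-- the rank A's membership chain effectively assigns to a set of normalized tokens
def rankOf (s : List String) : Int :=
  if "high" ∈ s then 3 else if "medium" ∈ s then 2 else if "low" ∈ s then 1 else 0

-- A's fold body, named for the lemmas
def foldA (s : PySem.Set String) (level : String) : PySem.Set String :=
  if PySem.Str.strip level ≠ "" then PySem.Set.add s (normalize_token_py level) else s

lemma rankD_eval (t : String) :
    PySem.Dict.getD RANK_py t 0 =
      if t = "high" then 3 else if t = "medium" then 2 else if t = "low" then 1 else 0 := by
  have hmk : RANK_py = PySem.Dict.mk [("high", 3), ("medium", 2), ("low", 1)] := by decide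
  rw [hmk, PySem.Dict.getD_eq_get?_getD, PySem.Dict.get?_mk_cons, PySem.Dict.get?_mk_cons,
      PySem.Dict.get?_mk_cons]
  by_cases h1 : t = "high"
  · subst h1; decide
  · by_cases h2 : t = "medium"
    · subst h2; decide
    · by_cases h3 : t = "low"
      · subst h3; decide
      · rw [beq_eq_false_iff_ne.mpr (Ne.symm h1), beq_eq_false_iff_ne.mpr (Ne.symm h2),
            beq_eq_false_iff_ne.mpr (Ne.symm h3)]
        simp [h1, h2, h3, PySem.Dict.get?]

lemma rankOf_add (s : PySem.Set String) (t : String) :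
    rankOf (PySem.Set.add s t) = max (rankOf s) (PySem.Dict.getD RANK_py t 0) := by
  rw [rankD_eval]
  unfold rankOf
  simp only [PySem.Set.mem_add]
  by_cases h1 : t = "high" <;> by_cases h2 : t = "medium" <;> by_cases h3 : t = "low" <;>
    split_ifs <;> simp_all

lemma mem_foldA_mono (l : List String) (s : PySem.Set String) (x : String) (hx : x ∈ s) :
    x ∈ l.foldl foldA s := by
  induction l generalizing s with
  | nil => exact hx
  | cons a l ih =>
    simp only [List.foldl_cons]
    apply ih
    unfold foldA
    split
    · exact (PySem.Set.mem_add _ _ _).mpr (Or.inl hx)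
    · exact hx

lemma altLoop_eq (l : List String) (s : PySem.Set String) :
    altLoop_py l (rankOf s) = rankOf (l.foldl foldA s) := by
  induction l generalizing s with
  | nil => rfl
  | cons a l ih =>
    simp only [List.foldl_cons, altLoop_py]
    by_cases hg : PySem.Str.strip a ≠ ""
    · rw [if_pos hg]
      have hfold : foldA s a = PySem.Set.add s (normalize_token_py a) := by
        unfold foldA; simp [hg]
      have hmax : (if PySem.Dict.getD RANK_py (normalize_token_py a) 0 > rankOf s
            then PySem.Dict.getD RANK_py (normalize_token_py a) 0 else rankOf s)
          = rankOf (PySem.Set.add s (normalize_token_py a)) := by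
        rw [rankOf_add]; split_ifs <;> omega
      rw [hmax, hfold]
      by_cases h3 : rankOf (PySem.Set.add s (normalize_token_py a)) = 3
      · simp only [h3]
        have hh : "high" ∈ PySem.Set.add s (normalize_token_py a) := by
          by_contra hh
          unfold rankOf at h3
          rw [if_neg hh] at h3
          split_ifs at h3 <;> omega
        have : "high" ∈ l.foldl foldA (PySem.Set.add s (normalize_token_py a)) :=
          mem_foldA_mono _ _ _ hh
        have : rankOf (l.foldl foldA (PySem.Set.add s (normalize_token_py a))) = 3 := by
          unfold rankOf; simp [this]
        simp [this]
      · have hb : ((rankOf (PySem.Set.add s (normalize_token_py a)) == 3) = false) := by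
          simp [h3]
        rw [hb]
        simp only [Bool.false_eq_true, if_false]
        exact ih _
    · rw [if_neg hg]
      have hfold : foldA s a = s := by unfold foldA; simp [hg]
      rw [hfold]
      exact ih _

lemma label_eq (s : PySem.Set String) :
    (if PySem.Set.contains s "high" then "high"
     else if PySem.Set.contains s "medium" then "medium"
     else if PySem.Set.contains s "low" then "low"
     else "medium")
    = PySem.Dict.getD LABEL_py (rankOf s) "medium" := by
  unfold rankOf
  by_cases h1 : "high" ∈ s <;> by_cases h2 : "medium" ∈ s <;> by_cases h3 : "low" ∈ s <;>
    simp [h1, h2, h3] <;> decide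

-- ===== VERDICT (by name: the statement is the Claim_ definition above) =====
theorem aggregate_risk_level_py_spec : Claim_equal_aggregate_risk_level_py := by
  intro levels _
  unfold Spec_aggregate_risk_level_py aggregate_risk_level_py aggregate_risk_level_py_alt
  have h0 : (0 : Int) = rankOf PySem.Set.empty := by decide
  rw [h0, altLoop_eq]
  have : (fun s level =>
      if PySem.Str.strip level ≠ "" then PySem.Set.add s (normalize_token_py level) else s) = foldA := by
    funext s level; rfl
  rw [this, label_eq]
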